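-- pv_equiv track=rewrite | github.com/nick-syz/algorithms_3 | ShellSort/ShellSort.py | KnuthSequence
-- ===== SOURCE A (Python) =====
-- def KnuthSequence(array_size, k_seq=None, i=1):
--     if k_seq is None:
--         k_seq = []
--     if not array_size:
--         return [1]
--     if array_size >= i:
--         KnuthSequence(array_size, k_seq, 3*i+1)
--         k_seq.append(i)
--     return k_seq
-- ===== SOURCE B (Python) =====
-- def KnuthSequence(array_size, k_seq=None, i=1):
--     if k_seq is None:
--         k_seq = []
--     if not array_size:
--         return [1]
--     # closed form: the k-th gap starting from i is 3**k * i + (3**k - 1) // 2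
--     n = 0
--     while 3**n * i + (3**n - 1) // 2 <= array_size:
--         n += 1
--     for k in range(n - 1, -1, -1):
--         k_seq.append(3**k * i + (3**k - 1) // 2)
--     return k_seq
-- ===== Notes on version B (the rewrite author's own statement) =====
-- stated objective: alternative
-- what changed: Replaces the recursion (recurse first, append on unwind) with the closed form gap_k = 3**k*i + (3**k-1)//2: count how many gaps fit, then emit them descending directly.
import Mathlib
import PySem

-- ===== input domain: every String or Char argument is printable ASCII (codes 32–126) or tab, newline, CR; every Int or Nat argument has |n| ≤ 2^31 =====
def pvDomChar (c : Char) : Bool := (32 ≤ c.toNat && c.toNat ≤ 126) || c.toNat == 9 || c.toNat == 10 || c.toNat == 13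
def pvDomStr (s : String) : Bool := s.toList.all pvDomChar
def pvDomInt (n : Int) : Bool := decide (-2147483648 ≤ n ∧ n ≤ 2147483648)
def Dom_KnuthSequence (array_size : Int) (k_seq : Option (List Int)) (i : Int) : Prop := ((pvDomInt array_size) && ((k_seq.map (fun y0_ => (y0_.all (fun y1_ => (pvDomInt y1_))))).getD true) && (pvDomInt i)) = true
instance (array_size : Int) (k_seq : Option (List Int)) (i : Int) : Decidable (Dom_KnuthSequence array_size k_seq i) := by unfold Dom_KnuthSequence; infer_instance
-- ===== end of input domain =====

-- B replaces A's recursion by a closed form (the k-th gap is 3^k*i + (3^k-1)//2): count the gaps,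
-- then emit them descending directly; equivalence is about the return value (both Pythons mutate
-- the passed k_seq in place in the same way).
-- ===== PORT A =====
-- recursive helper: the part of A after the guards. The Nat argument is fuel making the
-- recursion total; KnuthSequence passes enough of it for every input admitted by Pre_
-- (for i < 0 with i ≤ array_size ≠ 0 the Python recursion does not terminate, excluded by Pre_).
def pvKnuthRecA (array_size : Int) : Nat → Int → List Int
  | 0, _ => []
  | fuel + 1, i =>
    if array_size ≥ i then pvKnuthRecA array_size fuel (3 * i + 1) ++ [i] else []

def KnuthSequence (array_size : Int) (k_seq : Option (List Int)) (i : Int) : List Int :=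
  let ks := k_seq.getD []                       -- if k_seq is None: k_seq = []
  if array_size = 0 then [1]                    -- if not array_size: return [1]
  else ks ++ pvKnuthRecA array_size (array_size + 1 - i).toNat i   -- recursion appends gaps

-- ===== PORT B =====
-- 3**k * i + (3**k - 1) // 2, the k-th gap of the sequence starting at i
def pvTerm (i : Int) (k : Nat) : Int := 3 ^ k * i + PySem.Int.floordiv (3 ^ k - 1) 2

-- while 3**n * i + (3**n - 1) // 2 <= array_size: n += 1   (first Nat argument = fuel;
-- KnuthSequence_alt passes enough for every input admitted by Pre_)
def pvCountB (array_size : Int) (i : Int) : Nat → Nat → Nat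
  | 0, n => n
  | fuel + 1, n => if pvTerm i n ≤ array_size then pvCountB array_size i fuel (n + 1) else n

def KnuthSequence_alt (array_size : Int) (k_seq : Option (List Int)) (i : Int) : List Int :=
  let ks := k_seq.getD []
  if array_size = 0 then [1]
  else  -- for k in range(n-1, -1, -1): k_seq.append(3**k * i + (3**k - 1) // 2)
    ks ++ ((List.range (pvCountB array_size i (array_size + 2).toNat 0)).reverse.map
            (fun k => pvTerm i k))

-- ===== PRECONDITION & SPEC =====
-- Pre_ excludes exactly the inputs where A raises RecursionError (unbounded recursion for
-- negative i with i ≤ array_size ≠ 0); A returns on every input admitted here.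
def Pre_KnuthSequence (array_size : Int) (k_seq : Option (List Int)) (i : Int) : Prop :=
  array_size = 0 ∨ 0 ≤ i ∨ array_size < i
instance (array_size : Int) (k_seq : Option (List Int)) (i : Int) : Decidable (Pre_KnuthSequence array_size k_seq i) := by unfold Pre_KnuthSequence; infer_instance
def pvWitness_KnuthSequence : Int × Option (List Int) × Int := (13, some [7], 1)

def Spec_KnuthSequence (array_size : Int) (k_seq : Option (List Int)) (i : Int) (out : List Int) : Prop := out = KnuthSequence_alt array_size k_seq i
instance (array_size : Int) (k_seq : Option (List Int)) (i : Int) (out : List Int) : Decidable (Spec_KnuthSequence array_size k_seq i out) := by unfold Spec_KnuthSequence; infer_instance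

-- ===== CLAIM =====
def Claim_equal_KnuthSequence : Prop := ∀ (array_size : Int) (k_seq : Option (List Int)) (i : Int), Dom_KnuthSequence array_size k_seq i → Pre_KnuthSequence array_size k_seq i → Spec_KnuthSequence array_size k_seq i (KnuthSequence array_size k_seq i)

-- ===== LEMMAS AND PROOFS =====
theorem pvTerm_zero (i : Int) : pvTerm i 0 = i := by
  unfold pvTerm
  rw [PySem.Int.floordiv_eq_ediv_of_pos (by decide)]
  norm_num

theorem pvTerm_succ (i : Int) (n : Nat) : pvTerm i (n + 1) = pvTerm (3 * i + 1) n := by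
  unfold pvTerm
  obtain ⟨k, hk⟩ : ∃ k, (3:Int) ^ n = 2 * k + 1 := by
    rcases (Odd.pow (n := n) (⟨1, by ring⟩ : Odd (3:Int))) with ⟨k, hk⟩
    exact ⟨k, by omega⟩
  rw [PySem.Int.floordiv_eq_ediv_of_pos (by decide),
      PySem.Int.floordiv_eq_ediv_of_pos (by decide)]
  rw [pow_succ, hk]
  have e1 : (2 * k + 1) * 3 - 1 = 2 * (3 * k + 1) := by ring
  have e2 : (2 * k + 1) - 1 = 2 * k := by ring
  rw [e1, e2, Int.mul_ediv_cancel_left _ (by norm_num), Int.mul_ediv_cancel_left _ (by norm_num)]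
  ring

-- the counting loop shifted one index up counts the sequence started at 3*i+1 (no side conditions)
theorem pvCountB_shift (a i : Int) (f n : Nat) :
    pvCountB a i f (n + 1) = pvCountB a (3 * i + 1) f n + 1 := by
  induction f generalizing n with
  | zero => rfl
  | succ f ih =>
    simp only [pvCountB, pvTerm_succ]
    by_cases h : pvTerm (3 * i + 1) n ≤ a
    · rw [if_pos h, if_pos h, ih]
    · rw [if_neg h, if_neg h]

theorem pvCountB_stop (a i : Int) (f : Nat) (h : a < i) : pvCountB a i f 0 = 0 := by
  cases f with
  | zero => rfl
  | succ f => simp only [pvCountB, pvTerm_zero]; rw [if_neg (by omega)]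

-- main correspondence: with sufficient fuel on both sides, A's recursion produces exactly the
-- closed-form gaps, descending
theorem pvRecA_eq_closed (a : Int) (fA : Nat) :
    ∀ (fB : Nat) (i : Int), 0 ≤ i → a + 1 - i ≤ (fA : Int) → a + 2 - i ≤ (fB : Int) →
    pvKnuthRecA a fA i = (List.range (pvCountB a i fB 0)).reverse.map (fun k => pvTerm i k) := by
  induction fA with
  | zero =>
    intro fB i hi hfA _
    have h : a < i := by omega
    rw [pvCountB_stop a i fB h]
    rfl
  | succ fA ih =>
    intro fB i hi hfA hfB
    by_cases h : a ≥ i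
    · obtain ⟨fB', rfl⟩ : ∃ fB', fB = fB' + 1 := ⟨fB - 1, by omega⟩
      simp only [pvKnuthRecA, if_pos h, pvCountB, pvTerm_zero]
      rw [pvCountB_shift]
      rw [List.range_succ_eq_map]
      simp only [List.reverse_cons, List.map_append, List.map_map, List.map_reverse,
        List.map_cons, List.map_nil]
      rw [ih fB' (3 * i + 1) (by omega) (by omega) (by omega), pvTerm_zero]
      congr 1
      rw [List.map_reverse]
      congr 1
      exact List.map_congr_left (fun k _ => (pvTerm_succ i k).symm)
    · rw [pvCountB_stop a i fB (by omega)]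
      simp only [pvKnuthRecA, if_neg h]
      rfl

-- ===== VERDICT =====
theorem KnuthSequence_spec : Claim_equal_KnuthSequence := by
  intro a k i _ hpre
  unfold Spec_KnuthSequence KnuthSequence KnuthSequence_alt
  by_cases ha : a = 0
  · simp [ha]
  · simp only [if_neg ha]
    by_cases hi : 0 ≤ i
    · rw [pvRecA_eq_closed a (a + 1 - i).toNat (a + 2).toNat i hi (by omega) (by omega)]
    · have hlt : a < i := by rcases hpre with h | h | h <;> omega
      have ha2 : (a + 2).toNat = 0 := by omega
      have ha1 : (a + 1 - i).toNat = 0 := by omega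
      rw [ha2, ha1, pvCountB_stop a i 0 hlt]
      rfl
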